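-- pv_equiv track=rewrite | github.com/xVoid879/1.20-pre5-Loot-Drops | squid/squid.py | squid_sequence
-- ===== SOURCE A (Python) =====
-- MASK_64 = 0xFFFFFFFFFFFFFFFF
--
-- GOLDEN_RATIO_64 = 0x9e3779b97f4a7c15
--
-- SILVER_RATIO_64 = 0x6a09e667f3bcc909
--
-- SQUID_MD5_0 = 0xd1debecea9b76c48
--
-- SQUID_MD5_1 = 0xa17a5280a0ad83be
--
-- GLOW_SQUID_MD5_0 = 0xe5e13ed3665c1396
--
-- GLOW_SQUID_MD5_1 = 0xb0576dbfaa16cf2e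
--
-- STAFFORD_MIX_1 = 0xbf58476d1ce4e5b9
--
-- STAFFORD_MIX_2 = 0x94d049bb133111eb
--
-- MAX_SEQUENCE = 20
--
-- def rotl64(x, r):
--     return ((x << r) & MASK_64) | (x >> (64 - r))
--
-- def xNext64(state):
--     l, h = state
--     n = (rotl64((l + h) & MASK_64, 17) + l) & MASK_64
--     h ^= l
--     l_new = (rotl64(l, 49) ^ h ^ ((h << 21) & MASK_64)) & MASK_64
--     h_new = rotl64(h, 28) & MASK_64
--     state[0], state[1] = l_new, h_new
--     return n
--
-- def java_next_int(state, bound):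
--     while True:
--         i = xNext64(state) & 0xFFFFFFFF
--         j = (i * bound) & MASK_64
--         k = j & 0xFFFFFFFF
--         if k < bound:
--             l = (-bound) % bound
--             while k < l:
--                 i = xNext64(state) & 0xFFFFFFFF
--                 j = (i * bound) & MASK_64
--                 k = j & 0xFFFFFFFF
--         return (j >> 32) & 0xFFFFFFFF
--
-- def squid_sequence(seed, squid_type="normal", max_seq=MAX_SEQUENCE):
--     if squid_type == "normal":
--         md5_lo, md5_hi = SQUID_MD5_0, SQUID_MD5_1
--     elif squid_type == "glow":
--         md5_lo, md5_hi = GLOW_SQUID_MD5_0, GLOW_SQUID_MD5_1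
--     else:
--         raise ValueError(f"Wrong type: {squid_type}. Must be normal or glow.")
--
--     l = (seed ^ SILVER_RATIO_64) & MASK_64
--     h = (l + GOLDEN_RATIO_64) & MASK_64
--     l ^= md5_lo
--     h ^= md5_hi
--     l = ((l ^ (l >> 30)) * STAFFORD_MIX_1) & MASK_64
--     h = ((h ^ (h >> 30)) * STAFFORD_MIX_1) & MASK_64
--     l = ((l ^ (l >> 27)) * STAFFORD_MIX_2) & MASK_64
--     h = ((h ^ (h >> 27)) * STAFFORD_MIX_2) & MASK_64
--     l ^= (l >> 31)
--     h ^= (h >> 31)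
--
--     state = [l, h]
--     sequence = []
--
--     for _ in range(max_seq):
--         drops = java_next_int(state, 3) + 1
--         sequence.append(drops)
--
--     return sequence
-- ===== SOURCE B (Python) =====
-- MASK_64 = 0xFFFFFFFFFFFFFFFF
-- GOLDEN_RATIO_64 = 0x9e3779b97f4a7c15
-- SILVER_RATIO_64 = 0x6a09e667f3bcc909
-- SQUID_MD5_0 = 0xd1debecea9b76c48
-- SQUID_MD5_1 = 0xa17a5280a0ad83be
-- GLOW_SQUID_MD5_0 = 0xe5e13ed3665c1396
-- GLOW_SQUID_MD5_1 = 0xb0576dbfaa16cf2e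
-- STAFFORD_MIX_1 = 0xbf58476d1ce4e5b9
-- STAFFORD_MIX_2 = 0x94d049bb133111eb
-- MAX_SEQUENCE = 20
--
-- # Smallest 32-bit draw giving 2 drops, resp. 3 drops: the three intervals
-- # [0,T1), [T1,T2), [T2,2^32) are exactly where floor(3*i/2^32) is 0, 1, 2.
-- THRESH_1 = 1431655766
-- THRESH_2 = 2863311531
--
-- def _rotl64(x, r):
--     return ((x << r) & MASK_64) | (x >> (64 - r))
--
-- def _mix64(v):
--     v = ((v ^ (v >> 30)) * STAFFORD_MIX_1) & MASK_64
--     v = ((v ^ (v >> 27)) * STAFFORD_MIX_2) & MASK_64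
--     return v ^ (v >> 31)
--
-- def squid_sequence(seed, squid_type="normal", max_seq=MAX_SEQUENCE):
--     if squid_type == "normal":
--         md5_lo, md5_hi = SQUID_MD5_0, SQUID_MD5_1
--     elif squid_type == "glow":
--         md5_lo, md5_hi = GLOW_SQUID_MD5_0, GLOW_SQUID_MD5_1
--     else:
--         raise ValueError(f"Wrong type: {squid_type}. Must be normal or glow.")
--
--     l = (seed ^ SILVER_RATIO_64) & MASK_64
--     h = (l + GOLDEN_RATIO_64) & MASK_64
--     l = _mix64(l ^ md5_lo)
--     h = _mix64(h ^ md5_hi)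
--
--     # Pass 1: the raw 32-bit xoroshiro128++ stream.
--     raw = []
--     for _ in range(max_seq):
--         n = (_rotl64((l + h) & MASK_64, 17) + l) & MASK_64
--         h ^= l
--         l, h = (_rotl64(l, 49) ^ h ^ ((h << 21) & MASK_64)) & MASK_64, _rotl64(h, 28) & MASK_64
--         raw.append(n & 0xFFFFFFFF)
--
--     # Pass 2: classify each draw into 1/2/3 drops by interval thresholds
--     # (no multiply, shift or rejection machinery).
--     return [1 if i < THRESH_1 else 2 if i < THRESH_2 else 3 for i in raw]
-- ===== Notes on version B (the rewrite author's own statement) =====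
-- stated objective: alternative
-- what changed: B replaces the Java-style multiply-shift/rejection bounded sampler entirely by interval classification: each raw 32-bit xoroshiro draw is mapped to 1/2/3 drops by comparing against two precomputed thresholds (no multiplication, shift or rejection logic), and the generation is split into two staged passes (raw 32-bit stream first, then a classification comprehension) with the state threaded functionally instead of mutated in a list.
import Mathlib
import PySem

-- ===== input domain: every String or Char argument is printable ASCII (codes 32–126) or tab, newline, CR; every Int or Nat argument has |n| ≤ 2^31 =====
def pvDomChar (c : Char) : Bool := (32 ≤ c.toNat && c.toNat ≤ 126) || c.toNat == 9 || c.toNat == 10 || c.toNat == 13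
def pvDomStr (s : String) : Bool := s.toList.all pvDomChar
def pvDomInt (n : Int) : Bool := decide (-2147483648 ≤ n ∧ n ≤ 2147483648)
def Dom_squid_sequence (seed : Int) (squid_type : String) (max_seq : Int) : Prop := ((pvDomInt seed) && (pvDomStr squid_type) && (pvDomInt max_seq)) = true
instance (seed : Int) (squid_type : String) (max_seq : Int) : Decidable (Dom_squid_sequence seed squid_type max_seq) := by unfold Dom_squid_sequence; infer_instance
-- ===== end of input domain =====

-- B replaces A's multiply-shift/rejection bounded sampler by two-threshold interval
-- classification of the raw 32-bit draws, generated in a separate first pass; objective: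
-- alternative (equal cost). Equivalence is proved for the return value.
-- NOTE on port exactness: Python's `x & 0xFFFF…F` (an all-ones mask) is ported as `x % 2^k`
-- (Int.emod), which is exact for every Python int, negative ones included.

-- ===== PORT A =====
-- rotl64(x, r): ((x << r) & MASK_64) | (x >> (64 - r))
def rotl64 (x : Int) (r : Nat) : Int :=
  PySem.Int.bor ((x <<< r) % 18446744073709551616) (x >>> (64 - r))

-- xNext64(state): returns (n, new state) instead of mutating the 2-element list in place
def xNext64 (st : Int × Int) : Int × (Int × Int) :=
  let l := st.1
  let h := st.2
  let n := (rotl64 ((l + h) % 18446744073709551616) 17 + l) % 18446744073709551616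
  let h := PySem.Int.bxor h l
  let l_new := (PySem.Int.bxor (PySem.Int.bxor (rotl64 l 49) h) ((h <<< (21 : Nat)) % 18446744073709551616)) % 18446744073709551616
  let h_new := rotl64 h 28 % 18446744073709551616
  (n, (l_new, h_new))

-- the inner `while k < l` of java_next_int (fuel only makes the recursion total; for bound 3 the
-- loop guard is false at once, so the fuel is never consumed)
def javaNextIntLoop (fuel : Nat) (st : Int × Int) (j k lv bound : Int) : Int × (Int × Int) :=
  if k < lv then
    match fuel with
    | 0 => (j, st)
    | f + 1 =>
      let p := xNext64 st
      let i := p.1 % 4294967296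
      let j := (i * bound) % 18446744073709551616
      let k := j % 4294967296
      javaNextIntLoop f p.2 j k lv bound
  else (j, st)

-- java_next_int(state, bound): the outer `while True` body returns unconditionally, so it runs once
def java_next_int (st : Int × Int) (bound : Int) : Int × (Int × Int) :=
  let p := xNext64 st
  let i := p.1 % 4294967296
  let j := (i * bound) % 18446744073709551616
  let k := j % 4294967296
  if k < bound then
    let lv := PySem.Int.mod (-bound) bound
    let q := javaNextIntLoop 1000000 p.2 j k lv bound
    ((q.1 >>> (32 : Nat)) % 4294967296, q.2)
  else
    ((j >>> (32 : Nat)) % 4294967296, p.2)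

def squid_sequence (seed : Int) (squid_type : String) (max_seq : Int) : List Int :=
  -- else branch: Python raises ValueError there; those inputs are excluded by Pre_squid_sequence
  let md5 : Int × Int :=
    if squid_type = "normal" then (0xd1debecea9b76c48, 0xa17a5280a0ad83be)
    else if squid_type = "glow" then (0xe5e13ed3665c1396, 0xb0576dbfaa16cf2e)
    else (0, 0)
  let l := (PySem.Int.bxor seed 0x6a09e667f3bcc909) % 18446744073709551616
  let h := (l + 0x9e3779b97f4a7c15) % 18446744073709551616
  let l := PySem.Int.bxor l md5.1
  let h := PySem.Int.bxor h md5.2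
  let l := (PySem.Int.bxor l (l >>> (30 : Nat)) * 0xbf58476d1ce4e5b9) % 18446744073709551616
  let h := (PySem.Int.bxor h (h >>> (30 : Nat)) * 0xbf58476d1ce4e5b9) % 18446744073709551616
  let l := (PySem.Int.bxor l (l >>> (27 : Nat)) * 0x94d049bb133111eb) % 18446744073709551616
  let h := (PySem.Int.bxor h (h >>> (27 : Nat)) * 0x94d049bb133111eb) % 18446744073709551616
  let l := PySem.Int.bxor l (l >>> (31 : Nat))
  let h := PySem.Int.bxor h (h >>> (31 : Nat))
  ((PySem.List.pyRange 0 max_seq 1).foldl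
    (fun (acc : (Int × Int) × List Int) _ =>
      let p := java_next_int acc.1 3
      (p.2, acc.2 ++ [p.1 + 1]))
    ((l, h), [])).2

-- ===== PORT B =====
-- _rotl64(x, r)
def rotl64Alt (x : Int) (r : Nat) : Int :=
  PySem.Int.bor ((x <<< r) % 18446744073709551616) (x >>> (64 - r))

-- _mix64(v)
def mix64 (v : Int) : Int :=
  let v := (PySem.Int.bxor v (v >>> (30 : Nat)) * 0xbf58476d1ce4e5b9) % 18446744073709551616
  let v := (PySem.Int.bxor v (v >>> (27 : Nat)) * 0x94d049bb133111eb) % 18446744073709551616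
  PySem.Int.bxor v (v >>> (31 : Nat))

-- pass 1's loop body: one inlined xoroshiro128++ step appending the raw 32-bit draw
def rawStep (st : Int × Int × List Int) : Int × Int × List Int :=
  let l := st.1
  let h := st.2.1
  let n := (rotl64Alt ((l + h) % 18446744073709551616) 17 + l) % 18446744073709551616
  let h := PySem.Int.bxor h l
  (((PySem.Int.bxor (PySem.Int.bxor (rotl64Alt l 49) h) ((h <<< (21 : Nat)) % 18446744073709551616)) % 18446744073709551616),
   rotl64Alt h 28 % 18446744073709551616,
   st.2.2 ++ [n % 4294967296])

-- pass 2's classifier: `1 if i < THRESH_1 else 2 if i < THRESH_2 else 3`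
def classify (i : Int) : Int :=
  if i < 1431655766 then 1 else if i < 2863311531 then 2 else 3

def squid_sequence_alt (seed : Int) (squid_type : String) (max_seq : Int) : List Int :=
  -- else branch: Python B raises ValueError there; excluded by Pre_squid_sequence
  let md5 : Int × Int :=
    if squid_type = "normal" then (0xd1debecea9b76c48, 0xa17a5280a0ad83be)
    else if squid_type = "glow" then (0xe5e13ed3665c1396, 0xb0576dbfaa16cf2e)
    else (0, 0)
  let l := (PySem.Int.bxor seed 0x6a09e667f3bcc909) % 18446744073709551616
  let h := (l + 0x9e3779b97f4a7c15) % 18446744073709551616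
  let l := mix64 (PySem.Int.bxor l md5.1)
  let h := mix64 (PySem.Int.bxor h md5.2)
  let raw := ((List.range max_seq.toNat).foldl (fun st _ => rawStep st) (l, h, [])).2.2
  raw.map classify

-- ===== PRECONDITION & SPEC =====
-- Pre_ excludes exactly the squid types other than "normal"/"glow", on which both A and B raise ValueError.
def Pre_squid_sequence (seed : Int) (squid_type : String) (max_seq : Int) : Prop :=
  squid_type = "normal" ∨ squid_type = "glow"
instance (seed : Int) (squid_type : String) (max_seq : Int) : Decidable (Pre_squid_sequence seed squid_type max_seq) := by unfold Pre_squid_sequence; infer_instance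

def pvWitness_squid_sequence : Int × String × Int := (12345, "glow", 3)

def Spec_squid_sequence (seed : Int) (squid_type : String) (max_seq : Int) (out : List Int) : Prop := out = squid_sequence_alt seed squid_type max_seq
instance (seed : Int) (squid_type : String) (max_seq : Int) (out : List Int) : Decidable (Spec_squid_sequence seed squid_type max_seq out) := by unfold Spec_squid_sequence; infer_instance

-- ===== CLAIM =====
def Claim_equal_squid_sequence : Prop := ∀ (seed : Int) (squid_type : String) (max_seq : Int), Dom_squid_sequence seed squid_type max_seq → Pre_squid_sequence seed squid_type max_seq → Spec_squid_sequence seed squid_type max_seq (squid_sequence seed squid_type max_seq)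

-- ===== LEMMAS AND PROOFS =====

-- One draw of A's rejection sampler at bound 3 equals the direct multiply-shift draw: the drawn
-- 32-bit value i satisfies i*3 < 2^64 (the 64-bit mask is the identity), and in the rejection
-- branch l = (-3)%3 = 0 makes the inner while-loop guard k < 0 false at once.
lemma java_next_int_three (st : Int × Int) :
    java_next_int st 3 =
      ((((xNext64 st).1 % 4294967296) * 3) >>> (32 : Nat), (xNext64 st).2) := by
  have h32 : (0:Int) < 4294967296 := by norm_num
  have hi0 : 0 ≤ (xNext64 st).1 % 4294967296 := Int.emod_nonneg _ (by norm_num)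
  have hi1 : (xNext64 st).1 % 4294967296 < 4294967296 := Int.emod_lt_of_pos _ h32
  simp only [java_next_int]
  set i := (xNext64 st).1 % 4294967296 with hi
  have hj : (i * 3) % 18446744073709551616 = i * 3 := Int.emod_eq_of_lt (by omega) (by omega)
  have hsh : (i * 3) >>> (32 : Nat) = i * 3 / 4294967296 := by
    rw [Int.shiftRight_eq_div_pow]; norm_num
  have hk0 : 0 ≤ (i * 3) % 4294967296 := Int.emod_nonneg _ (by norm_num)
  have hmods : ((i * 3) >>> (32 : Nat)) % 4294967296 = (i * 3) >>> (32 : Nat) := by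
    rw [hsh]; exact Int.emod_eq_of_lt (by positivity) (by omega)
  rw [hj]
  split_ifs with hc
  · have hlv : PySem.Int.mod (-3) 3 = 0 := by decide
    rw [hlv, javaNextIntLoop, if_neg (by omega : ¬ (i * 3) % 4294967296 < 0), hmods]
  · rw [hmods]

-- The multiply-shift draw plus 1 is exactly B's threshold classification on 32-bit inputs.
lemma classify_eq (i : Int) (h0 : 0 ≤ i) (h1 : i < 4294967296) :
    (i * 3) >>> (32 : Nat) + 1 = classify i := by
  rw [Int.shiftRight_eq_div_pow]
  show i * 3 / 2 ^ 32 + 1 = classify i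
  unfold classify
  split_ifs <;> omega

-- B's raw-stream fold pulls its appended accumulator out front.
lemma rawFold_acc (rs : List Nat) :
    ∀ (l h : Int) (acc : List Int),
      (rs.foldl (fun st _ => rawStep st) (l, h, acc)).2.2
        = acc ++ (rs.foldl (fun st _ => rawStep st) (l, h, [])).2.2 := by
  induction rs with
  | nil => intro l h acc; simp
  | cons a t ih =>
    intro l h acc
    simp only [List.foldl_cons]
    rw [show rawStep (l, h, acc) = ((rawStep (l, h, [])).1, (rawStep (l, h, [])).2.1,
          acc ++ (rawStep (l, h, [])).2.2) from rfl]
    rw [ih, ih ((rawStep (l, h, [])).1) ((rawStep (l, h, [])).2.1) ((rawStep (l, h, [])).2.2)]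
    simp

-- Only the LENGTH of the iterated range matters: A's single fold (java_next_int draw, drops
-- appended) equals acc ++ (pass-2 classification of B's pass-1 raw stream).
lemma fold_eq {α : Type} (rs : List α) (rs' : List Nat) (hlen : rs.length = rs'.length) :
    ∀ (l h : Int) (acc : List Int),
    (rs.foldl
      (fun (acc : (Int × Int) × List Int) _ =>
        let p := java_next_int acc.1 3
        (p.2, acc.2 ++ [p.1 + 1]))
      ((l, h), acc)).2
    = acc ++ ((rs'.foldl (fun st _ => rawStep st) (l, h, [])).2.2).map classify := by
  induction rs generalizing rs' with
  | nil =>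
    intro l h acc
    rw [List.length_nil] at hlen
    rw [List.eq_nil_of_length_eq_zero hlen.symm]
    simp
  | cons a t ih =>
    intro l h acc
    cases rs' with
    | nil => simp at hlen
    | cons b t' =>
      simp only [List.length_cons, Nat.add_right_cancel_iff] at hlen
      simp only [List.foldl_cons]
      rw [java_next_int_three (l, h)]
      have hi0 : 0 ≤ (xNext64 (l, h)).1 % 4294967296 := Int.emod_nonneg _ (by norm_num)
      have hi1 : (xNext64 (l, h)).1 % 4294967296 < 4294967296 :=
        Int.emod_lt_of_pos _ (by norm_num)
      have hx : rawStep (l, h, []) =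
          ((xNext64 (l, h)).2.1, (xNext64 (l, h)).2.2, [(xNext64 (l, h)).1 % 4294967296]) := rfl
      rw [hx]
      rw [rawFold_acc]
      simp only [List.map_append, List.map_cons, List.map_nil]
      rw [ih t' hlen]
      rw [classify_eq _ hi0 hi1]
      simp

theorem squid_sequence_eq_alt (seed : Int) (squid_type : String) (max_seq : Int)
    (hpre : Pre_squid_sequence seed squid_type max_seq) :
    squid_sequence seed squid_type max_seq = squid_sequence_alt seed squid_type max_seq := by
  have hlen : (PySem.List.pyRange 0 max_seq 1).length = (List.range max_seq.toNat).length := by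
    rw [PySem.List.length_pyRange_one, List.length_range]
    simp
  rcases hpre with h | h <;> subst h <;>
    simp only [squid_sequence, squid_sequence_alt, mix64, reduceIte, String.reduceEq] <;>
    exact fold_eq _ _ hlen _ _ _

-- ===== VERDICT =====
theorem squid_sequence_spec : Claim_equal_squid_sequence := by
  intro seed squid_type max_seq _ hpre
  exact squid_sequence_eq_alt seed squid_type max_seq hpre
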